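-- pv_equiv track=rewrite | github.com/daureg/k-path-motif | find_k_motif.py | is_path
-- ===== SOURCE A (Python) =====
-- def is_path(walk):
--     uniq = []
--     for v in range(0, len(walk), 2):
--         if walk[v] not in uniq:
--             uniq.append(walk[v])
--         else:
--             return False
--
--     return True
-- ===== SOURCE B (Python) =====
-- def is_path(walk):
--     evens = sorted(walk[::2])
--     return all(a != b for a, b in zip(evens, evens[1:]))
-- ===== Notes on version B (the rewrite author's own statement) =====
-- stated objective: alternative
-- what changed: Replaces the incremental membership-scan with early return by a sort of the even-index slice followed by a single adjacent-pair inequality check (duplicates in a sorted list are adjacent).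
import Mathlib
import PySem

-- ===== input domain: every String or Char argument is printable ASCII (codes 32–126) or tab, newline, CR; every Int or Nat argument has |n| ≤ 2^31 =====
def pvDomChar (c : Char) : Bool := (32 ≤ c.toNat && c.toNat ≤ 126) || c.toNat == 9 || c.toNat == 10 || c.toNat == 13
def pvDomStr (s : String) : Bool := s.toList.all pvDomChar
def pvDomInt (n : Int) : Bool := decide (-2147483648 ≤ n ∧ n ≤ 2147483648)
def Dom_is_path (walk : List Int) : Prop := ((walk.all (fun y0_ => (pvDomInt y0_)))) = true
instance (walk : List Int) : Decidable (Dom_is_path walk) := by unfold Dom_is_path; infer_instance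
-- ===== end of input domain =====

-- B replaces A's incremental membership-scan with early return by sorting the even-index
-- slice and checking no adjacent pair is equal (objective: alternative algorithm).


-- ===== PORT A =====
-- the for-loop over range(0, len(walk), 2) with the accumulator `uniq` and the early return
def isPathGo (walk : List Int) (uniq : List Int) : List Int → Bool
  | [] => true
  | v :: vs =>
    match PySem.List.pyGet? walk v with
    | none => false          -- IndexError; unreachable: every v of the range is in bounds
    | some x => if uniq.contains x then false else isPathGo walk (uniq ++ [x]) vs

def is_path (walk : List Int) : Bool :=
  isPathGo walk [] (PySem.List.pyRange 0 (PySem.List.len walk) 2)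

-- ===== PORT B =====
-- evens[1:] is ported as `.drop 1` (exact for step-1 slices from 1); zip + all as in Source B
def is_path_alt (walk : List Int) : Bool :=
  match PySem.List.slice? walk none none 2 with
  | none => false            -- step = 0 only; unreachable for step 2
  | some evs =>
    let s := PySem.List.sorted evs (fun x => x) false
    (s.zip (s.drop 1)).all (fun p => p.1 != p.2)

-- ===== PRECONDITION & SPEC =====
def Spec_is_path (walk : List Int) (out : Bool) : Prop := out = is_path_alt walk
instance (walk : List Int) (out : Bool) : Decidable (Spec_is_path walk out) := by unfold Spec_is_path; infer_instance

-- ===== CLAIM (what is proved, stated in full; the proofs are below) =====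
def Claim_equal_is_path : Prop := ∀ (walk : List Int), Dom_is_path walk → Spec_is_path walk (is_path walk)

-- ===== LEMMAS AND PROOFS =====

/-- The even-index elements of a list. -/
def takeEven : List Int → List Int
  | [] => []
  | [a] => [a]
  | a :: _ :: t => a :: takeEven t

theorem map_getD_range_eq_takeEven : ∀ (xs : List Int),
    (List.range ((xs.length + 1) / 2)).map (fun k => xs.getD (2 * k) 0) = takeEven xs := by
  intro xs
  fun_induction takeEven xs with
  | case1 => simp
  | case2 a => simp
  | case3 a b t ih =>
    have hlen : (((a :: b :: t).length + 1) / 2) = (t.length + 1) / 2 + 1 := by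
      simp; omega
    rw [hlen, List.range_succ_eq_map]
    simp only [List.map_cons, List.map_map]
    have h2 : ((List.range ((t.length + 1) / 2)).map
        ((fun k => (a :: b :: t).getD (2 * k) 0) ∘ (· + 1))) =
        (List.range ((t.length + 1) / 2)).map (fun k => t.getD (2 * k) 0) := by
      apply List.map_congr_left
      intro k _
      show (a :: b :: t).getD (2 * (k + 1)) 0 = t.getD (2 * k) 0
      have h3 : 2 * (k + 1) = 2 * k + 2 := by ring
      rw [h3]
      rfl
    rw [h2, ih]
    rfl

theorem filterMap_eq_map_of_some {α β : Type} (f : α → Option β) (g : α → β) :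
    ∀ (l : List α), (∀ a ∈ l, f a = some (g a)) → l.filterMap f = l.map g := by
  intro l
  induction l with
  | nil => intro _; simp
  | cons x t ih =>
    intro h
    simp [h x (by simp), ih (fun a ha => h a (by simp [ha]))]

/-- A's scan, over the fetched values instead of the indices. -/
def distinctGo (uniq : List Int) : List Int → Bool
  | [] => true
  | x :: t => if uniq.contains x then false else distinctGo (uniq ++ [x]) t

theorem isPathGo_cons_some (walk uniq : List Int) (v : Int) (vs : List Int) (x : Int)
    (h : PySem.List.pyGet? walk v = some x) :
    isPathGo walk uniq (v :: vs) =
      if uniq.contains x then false else isPathGo walk (uniq ++ [x]) vs := by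
  conv_lhs => unfold isPathGo
  rw [h]

theorem isPathGo_eq (walk : List Int) : ∀ (ks : List Nat) (uniq : List Int),
    (∀ k ∈ ks, k < walk.length) →
    isPathGo walk uniq (ks.map (fun k => Int.ofNat k)) =
      distinctGo uniq (ks.map (fun k => walk.getD k 0)) := by
  intro ks
  induction ks with
  | nil => intro uniq _; rfl
  | cons k t ih =>
    intro uniq h
    have hk : k < walk.length := h k (by simp)
    have hget : PySem.List.pyGet? walk (Int.ofNat k) = some (walk.getD k 0) := by
      rw [show Int.ofNat k = ((k : Nat) : Int) from rfl]
      rw [PySem.List.pyGet?_natCast, List.getElem?_eq_getElem hk, List.getD_eq_getElem _ _ hk]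
    rw [List.map_cons, List.map_cons, isPathGo_cons_some walk uniq _ _ _ hget]
    unfold distinctGo
    split
    · rfl
    · exact ih _ (fun a ha => h a (by simp [ha]))

theorem distinctGo_eq_nodup : ∀ (vals uniq : List Int), uniq.Nodup →
    distinctGo uniq vals = decide (uniq ++ vals).Nodup := by
  intro vals
  induction vals with
  | nil => intro uniq h; simp [distinctGo, h]
  | cons x t ih =>
    intro uniq h
    unfold distinctGo
    by_cases hx : x ∈ uniq
    · rw [if_pos (by simpa using hx)]
      symm
      simp only [decide_eq_false_iff_not]
      intro hnd
      rw [List.nodup_append] at hnd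
      exact hnd.2.2 x hx x (by simp) rfl
    · rw [if_neg (by simpa using hx)]
      rw [ih (uniq ++ [x]) (by
        rw [List.nodup_append]
        exact ⟨h, by simp, fun a ha b hb => by
          simp at hb
          subst hb
          exact fun hax => hx (hax ▸ ha)⟩)]
      congr 1
      rw [List.append_assoc]
      rfl

theorem is_path_eq_nodup (walk : List Int) :
    is_path walk = decide (takeEven walk).Nodup := by
  unfold is_path
  rw [PySem.List.len_eq, PySem.List.pyRange_of_pos 0 (walk.length : Int) (by norm_num)]
  rw [show (if (0:Int) < (walk.length : Int) then (((walk.length : Int) - 0 + 2 - 1) / 2).toNat else 0)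
        = (walk.length + 1) / 2 by split_ifs <;> omega]
  have hcomp : (fun (k : Nat) => (0 : Int) + 2 * (k : Int)) =
      (fun k => Int.ofNat k) ∘ (fun k : Nat => 2 * k) := by
    funext k
    simp [Int.ofNat_eq_natCast]
  rw [hcomp, ← List.map_map]
  rw [isPathGo_eq walk _ [] (by
    intro k hk
    simp only [List.mem_map, List.mem_range] at hk
    obtain ⟨j, hj, rfl⟩ := hk
    omega)]
  rw [List.map_map]
  rw [show ((fun k => walk.getD k 0) ∘ fun k : Nat => 2 * k) = fun k => walk.getD (2 * k) 0 from rfl]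
  rw [map_getD_range_eq_takeEven]
  rw [distinctGo_eq_nodup _ [] (by simp)]
  simp

theorem slice_two_eq_takeEven (walk : List Int) :
    PySem.List.slice? walk none none 2 = some (takeEven walk) := by
  unfold PySem.List.slice? PySem.List.sliceIndices
  norm_num
  rw [show (if 0 < walk.length then (((walk.length : Int) + 2 - 1) / 2).toNat else 0)
        = (walk.length + 1) / 2 by split_ifs <;> omega]
  rw [filterMap_eq_map_of_some _ (fun k => walk.getD (2 * k) 0) _ ?_]
  · exact map_getD_range_eq_takeEven walk
  · intro k hk
    simp only [List.mem_range] at hk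
    have h2k : 2 * k < walk.length := by omega
    have ht : ((2 * (k : Int))).toNat = 2 * k := by omega
    show walk[((2 * (k:Int))).toNat]? = some (walk.getD (2 * k) 0)
    rw [ht, List.getElem?_eq_getElem h2k, List.getD_eq_getElem _ _ h2k]

/-- In a ≤-sorted list, no two adjacent elements equal ↔ no duplicates at all. -/
theorem adj_all_ne_eq_nodup : ∀ (s : List Int), s.Pairwise (· ≤ ·) →
    ((s.zip (s.drop 1)).all (fun p => p.1 != p.2)) = decide s.Nodup := by
  intro s
  induction s with
  | nil => intro _; simp
  | cons a t ih =>
    intro h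
    cases t with
    | nil => simp
    | cons b t' =>
      have hab : a ≤ b := (List.pairwise_cons.mp h).1 b (by simp)
      have hat' : ∀ x ∈ t', a ≤ x := fun x hx => (List.pairwise_cons.mp h).1 x (by simp [hx])
      have hbt' : ∀ x ∈ t', b ≤ x := fun x hx =>
        (List.pairwise_cons.mp (List.pairwise_cons.mp h).2).1 x hx
      have htail := ih (List.pairwise_cons.mp h).2
      simp only [List.drop_succ_cons, List.drop_zero, List.zip_cons_cons, List.all_cons] at htail ⊢
      by_cases heq : a = b
      · subst heq
        simp
      · have hne : (a != b) = true := by simpa using heq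
        rw [hne, Bool.true_and, htail]
        have hnotmem : a ∉ b :: t' := by
          intro hmem
          rcases List.mem_cons.mp hmem with h1 | h1
          · exact heq h1
          · have := hbt' a h1
            exact heq (le_antisymm hab this)
        simp [List.nodup_cons, hnotmem]
theorem is_path_alt_eq_nodup (walk : List Int) :
    is_path_alt walk = decide (takeEven walk).Nodup := by
  unfold is_path_alt
  rw [slice_two_eq_takeEven]
  have hperm := PySem.List.sorted_perm (takeEven walk) (fun x => x) false
  show (((PySem.List.sorted (takeEven walk) (fun x => x) false).zip
      ((PySem.List.sorted (takeEven walk) (fun x => x) false).drop 1)).all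
      (fun p => p.1 != p.2)) = _
  rw [adj_all_ne_eq_nodup _ (PySem.List.sorted_pairwise (takeEven walk) (fun x => x))]
  simp [hperm.nodup_iff]

-- ===== VERDICT (by name: the statement is the Claim_ definition above) =====
theorem is_path_spec : Claim_equal_is_path := by
  intro walk _
  unfold Spec_is_path
  rw [is_path_eq_nodup, is_path_alt_eq_nodup]
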